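-- pv_equiv track=rewrite | github.com/eliottcassidy2000/math | 04-computation/P_master_decomposition.py | P_base
-- ===== SOURCE A (Python) =====
-- from math import comb
--
-- def eulerian_number(n, k):
--     return sum((-1)**j * comb(n+1, j) * (k+1-j)**n for j in range(k+1))
--
-- def P_base(n_val, u_val):
--     """Compute P_n(u, 0) = A_n(t)/t^m in u = t + 1/t."""
--     d = n_val - 1
--     m = d // 2
--     coeffs = [eulerian_number(n_val, k) for k in range(n_val)]
--     U = [0] * (m + 1)
--     U[0] = 2
--     if m >= 1: U[1] = u_val
--     for j in range(2, m+1): U[j] = u_val * U[j-1] - U[j-2]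
--     result = coeffs[m]
--     for j in range(1, m+1): result += coeffs[m+j] * U[j]
--     return result
-- ===== SOURCE B (Python) =====
-- def P_base(n_val, u_val):
--     """Compute P_n(u, 0) = A_n(t)/t^m in u = t + 1/t."""
--     d = n_val - 1
--     m = d // 2
--     row = [1]
--     for n in range(2, n_val + 1):
--         prev = row + [0]
--         row = [1] + [(n - k) * prev[k - 1] + (k + 1) * prev[k] for k in range(1, n)]
--     coeffs = row
--     U = [0] * (m + 1)
--     U[0] = 2
--     if m >= 1: U[1] = u_val
--     for j in range(2, m+1): U[j] = u_val * U[j-1] - U[j-2]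
--     result = coeffs[m]
--     for j in range(1, m+1): result += coeffs[m+j] * U[j]
--     return result
-- ===== Notes on version B (the rewrite author's own statement) =====
-- stated objective: faster
-- what changed: B builds the Eulerian-number coefficients by a bottom-up DP over the classical triangle recurrence A(n,k)=(n-k)A(n-1,k-1)+(k+1)A(n-1,k) instead of evaluating an independent alternating binomial/power sum for each coefficient; the U-array build and final combination are kept as in A.
import Mathlib
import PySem

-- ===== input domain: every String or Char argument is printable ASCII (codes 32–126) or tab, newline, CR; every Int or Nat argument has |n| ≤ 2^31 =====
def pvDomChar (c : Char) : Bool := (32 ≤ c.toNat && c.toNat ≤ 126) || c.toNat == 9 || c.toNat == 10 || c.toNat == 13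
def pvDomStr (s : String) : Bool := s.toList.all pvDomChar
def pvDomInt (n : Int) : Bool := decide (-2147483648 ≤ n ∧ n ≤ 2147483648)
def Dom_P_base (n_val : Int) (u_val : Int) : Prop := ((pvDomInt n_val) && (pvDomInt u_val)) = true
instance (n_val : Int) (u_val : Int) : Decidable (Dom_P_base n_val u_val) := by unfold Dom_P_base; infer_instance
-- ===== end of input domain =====

-- B replaces the per-entry explicit Eulerian-number formula (a binomial/power sum per coefficient)
-- with a bottom-up DP over the Eulerian triangle recurrence; objective: faster (no big-power sums).
-- The U-array build and the final combination are kept exactly as in A.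

-- ===== PORT A =====
-- sum((-1)**j * comb(n+1, j) * (k+1-j)**n for j in range(k+1))
def pvEulerianNumber (n k : Int) : Int :=
  ((PySem.List.pyRange 0 (k + 1) 1).map
    (fun j => (-1 : Int) ^ j.toNat * ((n + 1).toNat.choose j.toNat : Int) * (k + 1 - j) ^ n.toNat)).sum

-- the U-array build and result combination, identical lines in A and in B (transliterated once)
def pvCombine (coeffs : List Int) (m u_val : Int) : Int :=
  let U := List.replicate (m + 1).toNat (0 : Int)
  let U := PySem.List.pySetD U 0 2
  let U := if 1 ≤ m then PySem.List.pySetD U 1 u_val else U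
  let U := (PySem.List.pyRange 2 (m + 1) 1).foldl
    (fun U j => PySem.List.pySetD U j
      (u_val * PySem.List.pyGetD U (j - 1) 0 - PySem.List.pyGetD U (j - 2) 0)) U
  let result := PySem.List.pyGetD coeffs m 0
  (PySem.List.pyRange 1 (m + 1) 1).foldl
    (fun result j => result + PySem.List.pyGetD coeffs (m + j) 0 * PySem.List.pyGetD U j 0) result

def P_base (n_val : Int) (u_val : Int) : Int :=
  let d := n_val - 1
  let m := PySem.Int.floordiv d 2
  let coeffs := (PySem.List.pyRange 0 n_val 1).map (fun k => pvEulerianNumber n_val k)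
  pvCombine coeffs m u_val

-- ===== PORT B =====
-- loop body: prev = row + [0]; row = [1] + [(n-k)*prev[k-1] + (k+1)*prev[k] for k in range(1, n)]
def pvRowStep (row : List Int) (n : Int) : List Int :=
  let prev := row ++ [0]
  1 :: (PySem.List.pyRange 1 n 1).map
    (fun k => (n - k) * PySem.List.pyGetD prev (k - 1) 0 + (k + 1) * PySem.List.pyGetD prev k 0)

def P_base_alt (n_val : Int) (u_val : Int) : Int :=
  let d := n_val - 1
  let m := PySem.Int.floordiv d 2
  let coeffs := (PySem.List.pyRange 2 (n_val + 1) 1).foldl pvRowStep [1]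
  pvCombine coeffs m u_val

-- ===== PRECONDITION & SPEC =====
-- A raises IndexError (U[0] = 2 on an empty U) exactly when n_val ≤ 0; Pre_ is A's exact return domain.
def Pre_P_base (n_val : Int) (u_val : Int) : Prop := 1 ≤ n_val
instance (n_val : Int) (u_val : Int) : Decidable (Pre_P_base n_val u_val) := by unfold Pre_P_base; infer_instance
def pvWitness_P_base : Int × Int := (3, 5)

def Spec_P_base (n_val : Int) (u_val : Int) (out : Int) : Prop := out = P_base_alt n_val u_val
instance (n_val : Int) (u_val : Int) (out : Int) : Decidable (Spec_P_base n_val u_val out) := by unfold Spec_P_base; infer_instance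

-- ===== CLAIM (what is proved, stated in full; the proofs are below) =====
def Claim_equal_P_base : Prop := ∀ (n_val : Int) (u_val : Int), Dom_P_base n_val u_val → Pre_P_base n_val u_val → Spec_P_base n_val u_val (P_base n_val u_val)

-- ===== LEMMAS AND PROOFS =====

-- mathematical spec of A's explicit Eulerian-number formula, on ℕ indices
def eN (n k : ℕ) : ℤ :=
  ∑ j ∈ Finset.range (k + 1), (-1 : ℤ) ^ j * ((n + 1).choose j : ℤ) * ((k : ℤ) + 1 - j) ^ n

lemma list_sum_map_range (g : ℕ → ℤ) (n : ℕ) :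
    ((List.range n).map g).sum = ∑ j ∈ Finset.range n, g j := by
  induction n with
  | zero => simp
  | succ n ih => simp [List.range_succ, Finset.sum_range_succ, ih]

lemma pvEulerian_eq_eN (N i : ℕ) : pvEulerianNumber (N : ℤ) (i : ℤ) = eN N i := by
  unfold pvEulerianNumber eN
  rw [show ((i : ℤ) + 1) = ((i + 1 : ℕ) : ℤ) by push_cast; ring, PySem.List.pyRange_one]
  simp only [sub_zero, Int.toNat_natCast, List.map_map]
  rw [list_sum_map_range]
  refine Finset.sum_congr rfl (fun j hj => ?_)
  have h1 : ((N : ℤ) + 1).toNat = N + 1 := by omega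
  simp only [Function.comp_apply, zero_add, Int.toNat_natCast, h1]
  try push_cast
  try ring

lemma eN_base (n : ℕ) : eN n 0 = 1 := by
  simp [eN]

-- termwise form of the Eulerian triangle recurrence (via Pascal and k·C(n,k) identities)
lemma pvTerm (m k : ℕ) : ∀ j ∈ Finset.range (k + 1),
    (-1:ℤ)^(j+1) * (((m+2).choose (j+1) : ℕ) : ℤ) * ((k:ℤ)+1-j)^(m+1)
      = ((m:ℤ)-k) * ((-1:ℤ)^j * (((m+1).choose j : ℕ) : ℤ) * ((k:ℤ)+1-j)^m)
        + ((k:ℤ)+2) * ((-1:ℤ)^(j+1) * (((m+1).choose (j+1) : ℕ) : ℤ) * ((k:ℤ)+1-j)^m) := by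
  intro j hj
  have hjk : j ≤ k := Nat.lt_succ_iff.mp (Finset.mem_range.mp hj)
  rw [show m+2 = (m+1)+1 by ring, Nat.choose_succ_succ (m+1) j]
  by_cases hjm : j ≤ m+1
  · have hc : (((m+1).choose (j+1) : ℕ) : ℤ) * ((j:ℤ)+1) = (((m+1).choose j : ℕ) : ℤ) * ((m:ℤ)+1-j) := by
      have h := congrArg (Nat.cast : ℕ → ℤ) (Nat.choose_succ_right_eq (m+1) j)
      push_cast [Nat.cast_sub hjm] at h
      linarith [h]
    rw [pow_succ ((k:ℤ)+1-(j:ℤ)) m]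
    push_cast
    linear_combination ((-1:ℤ)^j * ((k:ℤ)+1-(j:ℤ))^m) * hc
  · rw [Nat.choose_eq_zero_of_lt (show m+1 < j by omega), Nat.choose_eq_zero_of_lt (show m+1 < j+1 by omega)]
    push_cast
    ring

-- the Eulerian triangle recurrence, satisfied by the explicit formula
lemma eN_rec (m k : ℕ) :
    eN (m + 1) (k + 1) = ((m : ℤ) - k) * eN m k + ((k : ℤ) + 2) * eN m (k + 1) := by
  unfold eN
  push_cast
  rw [Finset.sum_range_succ' (fun j => (-1:ℤ)^j * (((m+1+1).choose j : ℕ) : ℤ) * ((k:ℤ)+1+1-j)^(m+1)) (k+1)]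
  rw [Finset.sum_range_succ' (fun j => (-1:ℤ)^j * (((m+1).choose j : ℕ) : ℤ) * ((k:ℤ)+1+1-j)^m) (k+1)]
  have hsum : (∑ j ∈ Finset.range (k+1), (-1:ℤ)^(j+1) * (((m+1+1).choose (j+1) : ℕ) : ℤ) * ((k:ℤ)+1+1-((j+1:ℕ):ℤ))^(m+1))
      = ∑ j ∈ Finset.range (k+1), (((m:ℤ)-k) * ((-1:ℤ)^j * (((m+1).choose j : ℕ) : ℤ) * ((k:ℤ)+1-j)^m)
        + ((k:ℤ)+2) * ((-1:ℤ)^(j+1) * (((m+1).choose (j+1) : ℕ) : ℤ) * ((k:ℤ)+1+1-((j+1:ℕ):ℤ))^m)) := by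
    refine Finset.sum_congr rfl (fun j hj => ?_)
    have h := pvTerm m k j hj
    push_cast
    linear_combination h
  rw [hsum, Finset.sum_add_distrib, ← Finset.mul_sum, ← Finset.mul_sum]
  rw [pow_succ]
  simp only [Nat.choose_zero_right]
  push_cast
  ring

lemma alt_sum_choose_one (K : ℕ) (hK : 1 ≤ K) :
    ∑ j ∈ Finset.range (K + 1), (-1 : ℤ) ^ j * ((Nat.choose 1 j : ℕ) : ℤ) = 0 := by
  induction K with
  | zero => omega
  | succ K ih =>
    rcases Nat.eq_zero_or_pos K with h0 | h0
    · subst h0; simp [Finset.sum_range_succ]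
    · rw [Finset.sum_range_succ, ih h0, Nat.choose_eq_zero_of_lt (by omega)]
      simp

lemma eN0 (K : ℕ) (hK : 1 ≤ K) : eN 0 K = 0 := by
  unfold eN
  simp only [pow_zero, mul_one, Nat.zero_add]
  exact alt_sum_choose_one K hK

lemma eN_vanish (m : ℕ) : ∀ K : ℕ, m ≤ K → 1 ≤ K → eN m K = 0 := by
  induction m with
  | zero => exact fun K _ hK => eN0 K hK
  | succ m ih =>
    intro K hmK hK
    obtain ⟨k, rfl⟩ : ∃ k, K = k + 1 := ⟨K - 1, by omega⟩
    rw [eN_rec]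
    rcases Nat.eq_zero_or_pos k with hk | hk
    · subst hk
      obtain rfl : m = 0 := by omega
      simp [ih 1 (by omega) (by omega)]
    · rw [ih k (by omega) hk, ih (k + 1) (by omega) (by omega)]
      ring

lemma step_spec (N : ℕ) (hN : 1 ≤ N) :
    pvRowStep ((List.range N).map (fun i => eN N i)) ((N : ℤ) + 1) =
      (List.range (N + 1)).map (fun i => eN (N + 1) i) := by
  simp only [pvRowStep]
  rw [List.range_succ_eq_map, List.map_cons, List.map_map]
  congr 1
  · exact (eN_base (N + 1)).symm
  · rw [PySem.List.pyRange_one]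
    rw [show ((N : ℤ) + 1 - 1).toNat = N by omega, List.map_map]
    refine List.map_congr_left (fun j hj => ?_)
    have hjN : j < N := List.mem_range.mp hj
    simp only [Function.comp_apply, Nat.succ_eq_add_one]
    rw [show (1 + (j : ℤ)) - 1 = ((j : ℕ) : ℤ) by ring,
        show (1 + (j : ℤ)) = (((j + 1 : ℕ)) : ℤ) by push_cast; ring,
        PySem.List.pyGetD_natCast, PySem.List.pyGetD_natCast]
    have hgj : ((List.range N).map (fun i => eN N i) ++ [0]).getD j 0 = eN N j := by
      rw [List.getD_eq_getElem?_getD, List.getElem?_append_left (by simpa using hjN)]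
      simp [hjN]
    rw [hgj]
    by_cases hj1 : j + 1 < N
    · have hgj1 : ((List.range N).map (fun i => eN N i) ++ [0]).getD (j + 1) 0 = eN N (j + 1) := by
        rw [List.getD_eq_getElem?_getD, List.getElem?_append_left (by simpa using hj1)]
        simp [hj1]
      rw [hgj1]
      have h := eN_rec N j
      push_cast
      linear_combination -h
    · have hjeq : j + 1 = N := by omega
      have hgj1 : ((List.range N).map (fun i => eN N i) ++ [0]).getD (j + 1) 0 = 0 := by
        rw [List.getD_eq_getElem?_getD, hjeq]
        rw [show N = ((List.range N).map (fun i => eN N i)).length by simp]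
        simp
      rw [hgj1]
      have h := eN_rec N j
      have hv : eN N (j + 1) = 0 := by
        rw [hjeq]; exact eN_vanish N N le_rfl hN
      rw [hv] at h
      push_cast
      linear_combination -h

lemma row_spec (N : ℕ) (hN : 1 ≤ N) :
    (PySem.List.pyRange 2 ((N : ℤ) + 1) 1).foldl pvRowStep [1] =
      (List.range N).map (fun i => eN N i) := by
  induction N with
  | zero => omega
  | succ N ih =>
    rcases Nat.eq_zero_or_pos N with h0 | h0
    · subst h0
      rw [show ((1 : ℕ) : ℤ) + 1 = 2 by norm_num, PySem.List.pyRange_one_eq_nil (by norm_num)]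
      simp [eN_base]
    · rw [show ((N + 1 : ℕ) : ℤ) + 1 = ((N : ℤ) + 1) + 1 by push_cast; ring,
        PySem.List.pyRange_one_succ_right (by omega), List.foldl_append]
      simp only [List.foldl_cons, List.foldl_nil]
      rw [ih h0]
      exact step_spec N h0

lemma coeffsA_spec (N : ℕ) :
    (PySem.List.pyRange 0 (N : ℤ) 1).map (fun k => pvEulerianNumber (N : ℤ) k) =
      (List.range N).map (fun i => eN N i) := by
  rw [PySem.List.pyRange_one]
  simp only [sub_zero, Int.toNat_natCast, List.map_map]
  refine List.map_congr_left (fun j hj => ?_)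
  simp only [Function.comp_apply, zero_add]
  exact pvEulerian_eq_eN N j

-- ===== VERDICT (by name: the statement is the Claim_ definition above) =====
theorem P_base_spec : Claim_equal_P_base := by
  intro n_val u_val _ hpre
  unfold Pre_P_base at hpre
  unfold Spec_P_base
  obtain ⟨N, rfl⟩ : ∃ N : ℕ, n_val = (N : ℤ) :=
    ⟨n_val.toNat, (Int.toNat_of_nonneg (by exact le_trans (by norm_num) hpre)).symm⟩
  have hN : 1 ≤ N := by exact_mod_cast hpre
  simp only [P_base, P_base_alt]
  rw [coeffsA_spec N, show (N : ℤ) + 1 = ((N : ℤ) + 1) by rfl, row_spec N hN]
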